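-- pv_equiv track=rewrite | github.com/songeg09/TFT-HELPER | FunctionalComputation/Econ.py | gold_calculator
-- ===== SOURCE A (Python) =====
-- def gold_calculator(start_gold, turns):
--
--     """
--
--     Args:
--         start_gold: (int) Inital Amount Of Gold
--         turns: (int) Number Of Future Turns That Are To Go By
--
--     Returns:
--
--     """
--
--     if type(start_gold) == int and type(turns) == int:
--
--         if turns >= 0 and start_gold >= 0:
--
--             final_amount = start_gold
--             base_income = 5
--
--             for turn in range(turns):
--
--                 if final_amount <= 9:
--                     final_amount += base_income
--
--                 elif 10 <= final_amount <= 19: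
--                     final_amount += base_income + 1
--
--                 elif 20 <= final_amount <= 29:
--                     final_amount += base_income + 2
--
--                 elif 30 <= final_amount <= 39:
--                     final_amount += base_income + 3
--
--                 elif 40 <= final_amount <= 49:
--                     final_amount += base_income + 4
--
--                 else:   # It Is 50 Or Greater
--                     final_amount += base_income + 5
--
--             result_text = f'In {turns} Turn(s) You Will Have {final_amount} Gold.'
--
--         else:   # Inform To Enter A Non-Negative Number
--             result_text = 'Please Enter Non-Negative Integer Arguments'
--
--     else:   # Inform Them To Enter Strictly Integers
--         result_text = 'Please Enter Non-Negative Integer Arguments'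
--
--     # We Iterate Through Text In Html So Need It As List
--     return [result_text]
-- ===== SOURCE B (Python) =====
-- def gold_calculator(start_gold, turns):
--     """Exact re-implementation: simulate only the below-50 phase (at most ~10
--     turns since income is >= 5), then add the constant 10/turn income in closed
--     form; O(1) instead of O(turns)."""
--     if type(start_gold) == int and type(turns) == int and start_gold >= 0 and turns >= 0:
--         gold = start_gold
--         t = turns
--         while t > 0 and gold < 50:
--             gold += 5 + gold // 10
--             t -= 1
--         gold += 10 * t
--         return [f'In {turns} Turn(s) You Will Have {gold} Gold.']
--     return ['Please Enter Non-Negative Integer Arguments']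
-- ===== Notes on version B (the rewrite author's own statement) =====
-- stated objective: faster
-- what changed: Instead of iterating the income table once per turn, B simulates only the below-50 phase (a bounded number of steps, since income is always at least 5, with interest computed as 5 + gold//10) and then adds the constant 10-gold-per-turn income for all remaining turns in closed form.
import Mathlib
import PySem

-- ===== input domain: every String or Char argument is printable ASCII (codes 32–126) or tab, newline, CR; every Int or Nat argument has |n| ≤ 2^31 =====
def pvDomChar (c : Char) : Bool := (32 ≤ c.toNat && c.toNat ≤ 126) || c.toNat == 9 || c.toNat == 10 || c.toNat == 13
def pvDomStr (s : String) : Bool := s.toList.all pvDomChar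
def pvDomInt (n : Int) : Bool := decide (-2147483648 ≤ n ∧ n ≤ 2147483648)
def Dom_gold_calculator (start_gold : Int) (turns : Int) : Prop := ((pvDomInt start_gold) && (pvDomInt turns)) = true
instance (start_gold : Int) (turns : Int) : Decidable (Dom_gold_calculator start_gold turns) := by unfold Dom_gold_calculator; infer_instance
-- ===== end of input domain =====

-- B replaces A's O(turns) turn-by-turn loop by simulating only the below-50 phase
-- (at most a few steps, since income is at least 5) and adding the then-constant
-- 10-gold income for the remaining turns in closed form (objective: faster, O(1)).

-- ===== PORT A =====
def gold_calculator (start_gold : Int) (turns : Int) : List String :=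
  -- `type(...) == int` is always true under the Int convention
  if turns ≥ 0 ∧ start_gold ≥ 0 then
    let base_income : Int := 5
    let final_amount :=
      (PySem.List.pyRange 0 turns 1).foldl (fun final_amount _ =>
        if final_amount ≤ 9 then final_amount + base_income
        else if 10 ≤ final_amount ∧ final_amount ≤ 19 then final_amount + (base_income + 1)
        else if 20 ≤ final_amount ∧ final_amount ≤ 29 then final_amount + (base_income + 2)
        else if 30 ≤ final_amount ∧ final_amount ≤ 39 then final_amount + (base_income + 3)
        else if 40 ≤ final_amount ∧ final_amount ≤ 49 then final_amount + (base_income + 4)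
        else final_amount + (base_income + 5)) start_gold
    ["In " ++ PySem.Int.toStr turns ++ " Turn(s) You Will Have " ++ PySem.Int.toStr final_amount ++ " Gold."]
  else ["Please Enter Non-Negative Integer Arguments"]

-- ===== PORT B =====
-- Source B's `while t > 0 and gold < 50`: structural recursion on the countdown t
def goldLoopB : Int → Nat → Int × Nat
  | gold, 0 => (gold, 0)
  | gold, t + 1 =>
      if gold < 50 then goldLoopB (gold + 5 + PySem.Int.floordiv gold 10) t
      else (gold, t + 1)

def gold_calculator_alt (start_gold : Int) (turns : Int) : List String :=
  if start_gold ≥ 0 ∧ turns ≥ 0 then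
    let p := goldLoopB start_gold turns.toNat
    let gold := p.1 + 10 * (p.2 : Int)
    ["In " ++ PySem.Int.toStr turns ++ " Turn(s) You Will Have " ++ PySem.Int.toStr gold ++ " Gold."]
  else ["Please Enter Non-Negative Integer Arguments"]

-- ===== PRECONDITION & SPEC =====
def Spec_gold_calculator (start_gold : Int) (turns : Int) (out : List String) : Prop := out = gold_calculator_alt start_gold turns
instance (start_gold : Int) (turns : Int) (out : List String) : Decidable (Spec_gold_calculator start_gold turns out) := by unfold Spec_gold_calculator; infer_instance

-- ===== CLAIM (what is proved, stated in full; the proofs are below) =====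
def Claim_equal_gold_calculator : Prop := ∀ (start_gold : Int) (turns : Int), Dom_gold_calculator start_gold turns → Spec_gold_calculator start_gold turns (gold_calculator start_gold turns)

-- ===== LEMMAS AND PROOFS =====

-- A's loop body as a function
def stepA (g : Int) : Int :=
  if g ≤ 9 then g + 5
  else if 10 ≤ g ∧ g ≤ 19 then g + (5 + 1)
  else if 20 ≤ g ∧ g ≤ 29 then g + (5 + 2)
  else if 30 ≤ g ∧ g ≤ 39 then g + (5 + 3)
  else if 40 ≤ g ∧ g ≤ 49 then g + (5 + 4)
  else g + (5 + 5)

lemma stepA_lt (g : Int) (h0 : 0 ≤ g) (h : g < 50) :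
    stepA g = g + 5 + PySem.Int.floordiv g 10 := by
  unfold stepA
  split_ifs with h1 h2 h3 h4 h5
  · have : PySem.Int.floordiv g 10 = 0 :=
      (PySem.Int.floordiv_eq_iff_of_pos (by norm_num)).mpr (by omega)
    omega
  · have : PySem.Int.floordiv g 10 = 1 :=
      (PySem.Int.floordiv_eq_iff_of_pos (by norm_num)).mpr (by omega)
    omega
  · have : PySem.Int.floordiv g 10 = 2 :=
      (PySem.Int.floordiv_eq_iff_of_pos (by norm_num)).mpr (by omega)
    omega
  · have : PySem.Int.floordiv g 10 = 3 :=
      (PySem.Int.floordiv_eq_iff_of_pos (by norm_num)).mpr (by omega)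
    omega
  · have : PySem.Int.floordiv g 10 = 4 :=
      (PySem.Int.floordiv_eq_iff_of_pos (by norm_num)).mpr (by omega)
    omega
  · omega

lemma stepA_ge (g : Int) (h : 50 ≤ g) : stepA g = g + 10 := by
  unfold stepA; split_ifs <;> omega

lemma fd10_nonneg (g : Int) (h : 0 ≤ g) : 0 ≤ PySem.Int.floordiv g 10 :=
  (PySem.Int.le_floordiv_iff_mul_le (by norm_num)).mpr (by omega)

-- the iterated A-step equals B's loop result plus 10 per remaining turn
lemma iter_eq_loopB (n : Nat) : ∀ g : Int, 0 ≤ g →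
    stepA^[n] g = (goldLoopB g n).1 + 10 * ((goldLoopB g n).2 : Int) := by
  induction n with
  | zero => intro g _; simp [goldLoopB]
  | succ m ih =>
    intro g hg
    rw [Function.iterate_succ_apply]
    by_cases h : g < 50
    · have hf := fd10_nonneg g hg
      rw [stepA_lt g hg h]
      simp only [goldLoopB, if_pos h]
      exact ih _ (by omega)
    · push Not at h
      have hstep : ∀ k : Nat, ∀ x : Int, 50 ≤ x →
          stepA^[k] x = x + 10 * (k : Int) := by
        intro k
        induction k with
        | zero => intro x _; simp
        | succ j ihj =>
          intro x hx
          rw [Function.iterate_succ_apply, stepA_ge x hx, ihj _ (by omega)]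
          push_cast; ring
      rw [stepA_ge g h, hstep m _ (by omega)]
      simp only [goldLoopB, if_neg (by omega : ¬ g < 50)]
      push_cast; ring

lemma foldl_const_iterate {α : Type} (l : List α) : ∀ g : Int,
    l.foldl (fun a _ => stepA a) g = stepA^[l.length] g := by
  induction l with
  | nil => intro g; simp
  | cons x xs ih =>
    intro g
    simp only [List.foldl_cons, List.length_cons, ih, Function.iterate_succ_apply]

-- ===== VERDICT (by name: the statement is the Claim_ definition above) =====
theorem gold_calculator_spec : Claim_equal_gold_calculator := by
  intro s t _
  unfold Spec_gold_calculator gold_calculator gold_calculator_alt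
  by_cases h : 0 ≤ t ∧ 0 ≤ s
  · rw [if_pos ⟨h.1, h.2⟩, if_pos ⟨h.2, h.1⟩]
    have hbody : (fun (final_amount : Int) (_ : Int) =>
        if final_amount ≤ 9 then final_amount + 5
        else if 10 ≤ final_amount ∧ final_amount ≤ 19 then final_amount + (5 + 1)
        else if 20 ≤ final_amount ∧ final_amount ≤ 29 then final_amount + (5 + 2)
        else if 30 ≤ final_amount ∧ final_amount ≤ 39 then final_amount + (5 + 3)
        else if 40 ≤ final_amount ∧ final_amount ≤ 49 then final_amount + (5 + 4)
        else final_amount + (5 + 5)) = (fun a (_ : Int) => stepA a) := by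
      funext a b; simp [stepA]
    simp only [hbody, foldl_const_iterate, PySem.List.length_pyRange_one]
    rw [show ((t : Int) - 0).toNat = t.toNat by omega]
    rw [iter_eq_loopB t.toNat s h.2]
  · rw [if_neg (by omega), if_neg (by omega)]
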